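-- pv_equiv track=rewrite | github.com/alisalimi13/RSEOT | Indexer.py | manipulate
-- ===== SOURCE A (Python) =====
-- StopChars = [ '0', '1', '2', '3', '4', '5', '6', '7', '8', '9',
-- 				'.', ';', ':', ',', '?', '!', '"', "'",
-- 				'{', '}', '[', ']', '(', ')', '<', '>',
-- 				'+', '-', '*', '/', '%', '=',
-- 				'&', '|', '^', '~',
-- 				'`', '@', '#', '$', '\\', '_', '“', '”' ]
--
-- def manipulate( t ):
-- 	for c in StopChars:
-- 		t = t.replace( c, '' )
-- 	while True:
-- 		if t.endswith( ('s', 'e', 'l') ):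
-- 			t = t[:-1]
-- 			continue
-- 		if t.endswith( ('ed', 'ly') ):
-- 			t = t[:-2]
-- 			continue
-- 		if t.endswith( 'ing' ):
-- 			t = t[:-3]
-- 			continue
-- 		break
-- 	return t
-- ===== SOURCE B (Python) =====
-- STOP = frozenset("0123456789.;:,?!\"'{}[]()<>+-*/%=&|^~`@#$\\_\u201c\u201d")
--
-- def manipulate(t):
--     # one pass: keep non-stop chars, reversed so the suffix sits at the front
--     r = [c for c in reversed(t) if c not in STOP]
--     n = len(r)
--     i = 0
--     while i < n:
--         c = r[i]
--         if c == 's' or c == 'e' or c == 'l':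
--             i += 1
--         elif c == 'd' and i + 1 < n and r[i + 1] == 'e':
--             i += 2
--         elif c == 'y' and i + 1 < n and r[i + 1] == 'l':
--             i += 2
--         elif c == 'g' and i + 2 < n and r[i + 1] == 'n' and r[i + 2] == 'i':
--             i += 3
--         else:
--             break
--     return ''.join(reversed(r[i:]))
-- ===== Notes on version B (the rewrite author's own statement) =====
-- stated objective: alternative
-- what changed: B replaces A's 44 whole-string replace passes with a single membership-filter pass over the reversed string and strips the suffixes with one advancing index instead of repeated slicing; asymptotically O(n) vs A's O(44*n + k^2) copies, though A's C-level replace makes wall-clock gains input-dependent.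
import Mathlib
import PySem

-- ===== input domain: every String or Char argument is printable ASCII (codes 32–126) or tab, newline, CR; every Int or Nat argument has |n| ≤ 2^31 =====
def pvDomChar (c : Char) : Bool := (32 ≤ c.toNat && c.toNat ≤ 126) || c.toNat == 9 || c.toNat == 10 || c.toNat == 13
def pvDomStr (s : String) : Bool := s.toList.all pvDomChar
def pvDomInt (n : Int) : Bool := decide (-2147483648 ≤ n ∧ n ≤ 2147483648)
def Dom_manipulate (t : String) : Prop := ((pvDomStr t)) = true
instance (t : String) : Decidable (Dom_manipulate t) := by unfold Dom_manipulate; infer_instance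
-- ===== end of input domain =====

-- B filters stop chars in a single pass over the reversed string and strips the
-- suffixes with one advancing index, instead of A's 44 replace passes and repeated
-- slicing (alternative algorithm; wall-clock speed not claimed).

-- ===== PORT A =====
-- the module constant StopChars (list of one-char strings)
def pvStopChars : List String :=
  [ "0", "1", "2", "3", "4", "5", "6", "7", "8", "9",
    ".", ";", ":", ",", "?", "!", "\"", "'",
    "{", "}", "[", "]", "(", ")", "<", ">",
    "+", "-", "*", "/", "%", "=",
    "&", "|", "^", "~",
    "`", "@", "#", "$", "\\", "_", "“", "”" ]

-- termination helper for the while-loop: a suffix-removing slice shortens a nonempty string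
theorem pvSliceNegLen (s : List Char) (k : Nat) (hk : 0 < k) :
    (PySem.List.slice s none (some (-(k : Int)))).length = s.length - k := by
  simp only [PySem.List.slice, PySem.List.clampIdx]
  split_ifs with h1 h2 <;> simp <;> omega

theorem pvEndswithNeNil (s p : List Char) (hp : p ≠ []) (h : PySem.Chars.endswith s p = true) :
    s ≠ [] := by
  simp only [PySem.Chars.endswith, List.isSuffixOf_iff_suffix] at h
  rcases h with ⟨u, rfl⟩
  intro hnil
  exact hp (by simpa using (List.append_eq_nil_iff.mp hnil).2)

-- A's while-loop, literally: check the suffixes in A's order, slice with t[:-1]/t[:-2]/t[:-3]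
def pvLoopA (s : List Char) : List Char :=
  if h1 : (PySem.Chars.endswith s ['s'] || PySem.Chars.endswith s ['e'] ||
           PySem.Chars.endswith s ['l']) = true then
    pvLoopA (PySem.List.slice s none (some (-1)))
  else if h2 : (PySem.Chars.endswith s ['e', 'd'] || PySem.Chars.endswith s ['l', 'y']) = true then
    pvLoopA (PySem.List.slice s none (some (-2)))
  else if h3 : PySem.Chars.endswith s ['i', 'n', 'g'] = true then
    pvLoopA (PySem.List.slice s none (some (-3)))
  else s
termination_by s.length
decreasing_by
  · rcases Bool.or_eq_true _ _ |>.mp h1 with h | h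
    · rcases Bool.or_eq_true _ _ |>.mp h with h | h
      all_goals {
        have := pvEndswithNeNil _ _ (by simp) h
        have hlen : s.length ≠ 0 := by simpa [List.length_eq_zero_iff] using this
        rw [show ((-1 : Int)) = -((1 : Nat) : Int) by norm_num, pvSliceNegLen s 1 (by omega)]
        omega }
    · have := pvEndswithNeNil _ _ (by simp) h
      have hlen : s.length ≠ 0 := by simpa [List.length_eq_zero_iff] using this
      rw [show ((-1 : Int)) = -((1 : Nat) : Int) by norm_num, pvSliceNegLen s 1 (by omega)]
      omega
  · have hne : s ≠ [] := by
      rcases Bool.or_eq_true _ _ |>.mp h2 with h | h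
      · exact pvEndswithNeNil _ _ (by simp) h
      · exact pvEndswithNeNil _ _ (by simp) h
    have hlen : s.length ≠ 0 := by simpa [List.length_eq_zero_iff] using hne
    rw [show ((-2 : Int)) = -((2 : Nat) : Int) by norm_num, pvSliceNegLen s 2 (by omega)]
    omega
  · have hne : s ≠ [] := pvEndswithNeNil _ _ (by simp) h3
    have hlen : s.length ≠ 0 := by simpa [List.length_eq_zero_iff] using hne
    rw [show ((-3 : Int)) = -((3 : Nat) : Int) by norm_num, pvSliceNegLen s 3 (by omega)]
    omega

def manipulate (t : String) : String :=
  let t1 := pvStopChars.foldl (fun s c => PySem.Str.replace s c "") t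
  String.ofList (pvLoopA t1.toList)

-- ===== PORT B =====
-- the module constant STOP (set of stop characters)
def pvStop : List Char :=
  [ '0', '1', '2', '3', '4', '5', '6', '7', '8', '9',
    '.', ';', ':', ',', '?', '!', '"', '\'',
    '{', '}', '[', ']', '(', ')', '<', '>',
    '+', '-', '*', '/', '%', '=',
    '&', '|', '^', '~',
    '`', '@', '#', '$', '\\', '_', '“', '”' ]

-- B's index loop on the reversed list: advancing the index = consuming the list
def pvStripRev (r : List Char) : List Char :=
  match r with
  | [] => []
  | c :: rest =>
    if c = 's' ∨ c = 'e' ∨ c = 'l' then pvStripRev rest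
    else if c = 'd' ∧ rest.head? = some 'e' then pvStripRev rest.tail
    else if c = 'y' ∧ rest.head? = some 'l' then pvStripRev rest.tail
    else if c = 'g' ∧ rest.head? = some 'n' ∧ rest.tail.head? = some 'i' then
      pvStripRev rest.tail.tail
    else c :: rest
termination_by r.length
decreasing_by
  all_goals simp only [List.length_tail, List.length_cons]
  all_goals omega

def manipulate_alt (t : String) : String :=
  String.ofList ((pvStripRev ((t.toList.reverse).filter (fun c => !(pvStop.contains c)))).reverse)

-- ===== PRECONDITION & SPEC =====
def Spec_manipulate (t : String) (out : String) : Prop := out = manipulate_alt t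
instance (t : String) (out : String) : Decidable (Spec_manipulate t out) := by unfold Spec_manipulate; infer_instance

-- ===== CLAIM (what is proved, stated in full; the proofs are below) =====
def Claim_equal_manipulate : Prop := ∀ (t : String), Dom_manipulate t → Spec_manipulate t (manipulate t)

-- ===== LEMMAS AND PROOFS =====

-- str.replace(c, '') deletes every occurrence of the character c
theorem pvReplaceGoFilter (c : Char) (l : List Char) : ∀ (fuel : Nat) (acc : List Char),
    l.length ≤ fuel →
    PySem.Chars.replace.go [c] [] fuel l acc = acc.reverse ++ l.filter (fun x => !(x == c)) := by
  induction l with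
  | nil =>
    intro fuel acc _
    cases fuel <;> simp [PySem.Chars.replace.go]
  | cons x t ih =>
    intro fuel acc hlen
    cases fuel with
    | zero => simp at hlen
    | succ f =>
      rw [PySem.Chars.replace.go]
      by_cases hx : c = x
      · subst hx
        simp only [List.isPrefixOf, BEq.rfl, Bool.true_and,
          List.length_cons, List.length_nil, List.drop_succ_cons, List.drop_zero,
          List.reverse_nil, List.nil_append]
        rw [ih f acc (by simp at hlen; omega)]
        simp
      · have : ([c].isPrefixOf (x :: t)) = false := by
          simp [List.isPrefixOf, beq_eq_false_iff_ne, hx]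
        rw [this]
        simp only [Bool.false_eq_true, if_false]
        rw [ih f (x :: acc) (by simp at hlen; omega)]
        simp [beq_eq_false_iff_ne, Ne.symm hx]

theorem pvReplaceFilter (c : Char) (s : List Char) :
    PySem.Chars.replace s [c] [] = s.filter (fun x => !(x == c)) := by
  rw [PySem.Chars.replace]
  simp only [List.isEmpty_cons, Bool.false_eq_true, if_false]
  simpa using pvReplaceGoFilter c s s.length [] le_rfl

-- the 44 replace passes delete exactly the stop characters
theorem pvFoldlReplaceFilter (stops : List Char) : ∀ (s : String),
    ((stops.map (fun c => String.ofList [c])).foldl (fun acc p => PySem.Str.replace acc p "") s).toList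
      = s.toList.filter (fun x => !(stops.contains x)) := by
  induction stops with
  | nil => intro s; simp
  | cons c cs ih =>
    intro s
    simp only [List.map_cons, List.foldl_cons]
    rw [ih]
    have hrep : (PySem.Str.replace s (String.ofList [c]) "").toList
        = s.toList.filter (fun x => !(x == c)) := by
      rw [PySem.Str.toList_replace]
      simp only [String.toList_ofList]
      simpa using pvReplaceFilter c s.toList
    rw [hrep, List.filter_filter]
    apply List.filter_congr
    intro x _
    cases hxc : x == c <;> cases hcs : cs.contains x <;>
      simp_all

theorem pvStopCharsEq : pvStopChars = pvStop.map (fun c => String.ofList [c]) := by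
  decide

-- endswith on a reversed list is isPrefixOf of the reversed pattern
theorem pvEndswithRev (l p : List Char) :
    PySem.Chars.endswith l.reverse p = p.reverse.isPrefixOf l := by
  simp [PySem.Chars.endswith, List.isSuffixOf]

-- t[:-k] of a reversed list drops k from the front
theorem pvSliceRevDrop (l : List Char) (k : Nat) (hk : 0 < k) :
    PySem.List.slice l.reverse none (some (-(k : Int))) = (l.drop k).reverse := by
  simp only [PySem.List.slice, PySem.List.clampIdx]
  by_cases hlt : ((l.reverse.length : Int)) + -(k : Int) < 0
  · have hd : l.drop k = [] := List.drop_eq_nil_of_le (by simp at hlt ⊢; omega)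
    rw [if_pos (by omega), if_pos hlt]
    simp [hd]
  · rw [if_pos (by omega), if_neg hlt]
    rw [List.reverse_drop]
    simp only [Nat.sub_zero, List.drop_zero]
    congr 1
    simp at hlt ⊢
    omega

theorem pvSingletonIsPrefixOf (a : Char) (l : List Char) :
    ([a].isPrefixOf l) = (l.head? == some a) := by
  cases l with
  | nil => simp [List.isPrefixOf]
  | cons x t => simp [List.isPrefixOf, BEq.comm]

-- A's three suffix tests, computed on the reversed list c :: rest
theorem pvEnd1 (c x : Char) (rest : List Char) :
    PySem.Chars.endswith (c :: rest).reverse [x] = (x == c) := by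
  rw [pvEndswithRev]
  simp [List.isPrefixOf]

theorem pvEnd2 (c a b : Char) (rest : List Char) :
    PySem.Chars.endswith (c :: rest).reverse [a, b] =
      ((b == c) && (rest.head? == some a)) := by
  rw [pvEndswithRev (c :: rest) [a, b]]
  simp [List.isPrefixOf, pvSingletonIsPrefixOf]

theorem pvEnd3 (c a b d : Char) (rest : List Char) :
    PySem.Chars.endswith (c :: rest).reverse [a, b, d] =
      ((d == c) && (rest.head? == some b) && (rest.tail.head? == some a)) := by
  rw [pvEndswithRev (c :: rest) [a, b, d]]
  cases rest with
  | nil => simp [List.isPrefixOf]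
  | cons y t => simp [List.isPrefixOf, pvSingletonIsPrefixOf, BEq.comm, Bool.and_assoc]

theorem pvDropTwo (c : Char) (rest : List Char) : (c :: rest).drop 2 = rest.tail := by
  cases rest <;> simp

theorem pvDropThree (c : Char) (rest : List Char) : (c :: rest).drop 3 = rest.tail.tail := by
  cases rest with
  | nil => simp
  | cons y t => cases t <;> simp

-- A's while-loop equals B's index loop (stated on the reversed list)
theorem pvLoopEqStrip (r : List Char) : pvLoopA r.reverse = (pvStripRev r).reverse := by
  induction r using pvStripRev.induct with
  | case1 =>
    rw [pvLoopA, pvStripRev]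
    simp [PySem.Chars.endswith, List.isSuffixOf]
  | case2 c rest hsel ih =>
    rw [pvLoopA]
    have hc : (PySem.Chars.endswith (c :: rest).reverse ['s'] ||
        PySem.Chars.endswith (c :: rest).reverse ['e'] ||
        PySem.Chars.endswith (c :: rest).reverse ['l']) = true := by
      rw [pvEnd1, pvEnd1, pvEnd1]
      rcases hsel with h | h | h <;> subst h <;> simp
    rw [dif_pos hc, show ((-1 : Int)) = -((1 : Nat) : Int) by norm_num,
      pvSliceRevDrop (c :: rest) 1 (by omega)]
    simp only [List.drop_one, List.tail_cons]
    rw [ih, pvStripRev, if_pos hsel]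
  | case3 c rest hsel hde ih =>
    rw [pvLoopA]
    have hc1 : (PySem.Chars.endswith (c :: rest).reverse ['s'] ||
        PySem.Chars.endswith (c :: rest).reverse ['e'] ||
        PySem.Chars.endswith (c :: rest).reverse ['l']) = false := by
      rw [pvEnd1, pvEnd1, pvEnd1]
      simp only [Bool.or_eq_false_iff, beq_eq_false_iff_ne, ne_eq]
      push_neg at hsel
      exact ⟨⟨fun h => hsel.1 h.symm, fun h => hsel.2.1 h.symm⟩, fun h => hsel.2.2 h.symm⟩
    have hc2 : (PySem.Chars.endswith (c :: rest).reverse ['e', 'd'] ||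
        PySem.Chars.endswith (c :: rest).reverse ['l', 'y']) = true := by
      rw [pvEnd2, pvEnd2]
      simp [hde.1, hde.2]
    rw [dif_neg (by simp only [hc1, Bool.false_eq_true, not_false_eq_true]), dif_pos hc2,
      show ((-2 : Int)) = -((2 : Nat) : Int) by norm_num,
      pvSliceRevDrop (c :: rest) 2 (by omega), pvDropTwo]
    rw [ih, pvStripRev, if_neg hsel, if_pos hde]
  | case4 c rest hsel hde hyl ih =>
    rw [pvLoopA]
    have hc1 : (PySem.Chars.endswith (c :: rest).reverse ['s'] ||
        PySem.Chars.endswith (c :: rest).reverse ['e'] ||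
        PySem.Chars.endswith (c :: rest).reverse ['l']) = false := by
      rw [pvEnd1, pvEnd1, pvEnd1]
      simp only [Bool.or_eq_false_iff, beq_eq_false_iff_ne, ne_eq]
      push_neg at hsel
      exact ⟨⟨fun h => hsel.1 h.symm, fun h => hsel.2.1 h.symm⟩, fun h => hsel.2.2 h.symm⟩
    have hc2 : (PySem.Chars.endswith (c :: rest).reverse ['e', 'd'] ||
        PySem.Chars.endswith (c :: rest).reverse ['l', 'y']) = true := by
      rw [pvEnd2, pvEnd2]
      simp [hyl.1, hyl.2]
    rw [dif_neg (by simp only [hc1, Bool.false_eq_true, not_false_eq_true]), dif_pos hc2,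
      show ((-2 : Int)) = -((2 : Nat) : Int) by norm_num,
      pvSliceRevDrop (c :: rest) 2 (by omega), pvDropTwo]
    rw [ih, pvStripRev, if_neg hsel, if_neg hde, if_pos hyl]
  | case5 c rest hsel hde hyl hgni ih =>
    rw [pvLoopA]
    have hc1 : (PySem.Chars.endswith (c :: rest).reverse ['s'] ||
        PySem.Chars.endswith (c :: rest).reverse ['e'] ||
        PySem.Chars.endswith (c :: rest).reverse ['l']) = false := by
      rw [pvEnd1, pvEnd1, pvEnd1]
      simp only [Bool.or_eq_false_iff, beq_eq_false_iff_ne, ne_eq]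
      push_neg at hsel
      exact ⟨⟨fun h => hsel.1 h.symm, fun h => hsel.2.1 h.symm⟩, fun h => hsel.2.2 h.symm⟩
    have hc2 : (PySem.Chars.endswith (c :: rest).reverse ['e', 'd'] ||
        PySem.Chars.endswith (c :: rest).reverse ['l', 'y']) = false := by
      rw [pvEnd2, pvEnd2]
      simp only [Bool.or_eq_false_iff, Bool.and_eq_false_iff]
      constructor
      · by_cases h : c = 'd'
        · right; subst h
          simp only [beq_eq_false_iff_ne, ne_eq]
          intro hh
          exact hde ⟨rfl, by simpa using hh⟩
        · left; simp [beq_eq_false_iff_ne, Ne.symm h]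
      · by_cases h : c = 'y'
        · right; subst h
          simp only [beq_eq_false_iff_ne, ne_eq]
          intro hh
          exact hyl ⟨rfl, by simpa using hh⟩
        · left; simp [beq_eq_false_iff_ne, Ne.symm h]
    have hc3 : PySem.Chars.endswith (c :: rest).reverse ['i', 'n', 'g'] = true := by
      rw [pvEnd3]
      simp [hgni.1, hgni.2.1, hgni.2.2]
    rw [dif_neg (by simp only [hc1, Bool.false_eq_true, not_false_eq_true]), dif_neg (by simp only [hc2, Bool.false_eq_true, not_false_eq_true]), dif_pos hc3,
      show ((-3 : Int)) = -((3 : Nat) : Int) by norm_num,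
      pvSliceRevDrop (c :: rest) 3 (by omega), pvDropThree]
    rw [ih, pvStripRev, if_neg hsel, if_neg hde, if_neg hyl, if_pos hgni]
  | case6 c rest hsel hde hyl hgni =>
    rw [pvLoopA]
    have hc1 : (PySem.Chars.endswith (c :: rest).reverse ['s'] ||
        PySem.Chars.endswith (c :: rest).reverse ['e'] ||
        PySem.Chars.endswith (c :: rest).reverse ['l']) = false := by
      rw [pvEnd1, pvEnd1, pvEnd1]
      simp only [Bool.or_eq_false_iff, beq_eq_false_iff_ne, ne_eq]
      push_neg at hsel
      exact ⟨⟨fun h => hsel.1 h.symm, fun h => hsel.2.1 h.symm⟩, fun h => hsel.2.2 h.symm⟩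
    have hc2 : (PySem.Chars.endswith (c :: rest).reverse ['e', 'd'] ||
        PySem.Chars.endswith (c :: rest).reverse ['l', 'y']) = false := by
      rw [pvEnd2, pvEnd2]
      simp only [Bool.or_eq_false_iff, Bool.and_eq_false_iff]
      constructor
      · by_cases h : c = 'd'
        · right; subst h
          simp only [beq_eq_false_iff_ne, ne_eq]
          intro hh
          exact hde ⟨rfl, by simpa using hh⟩
        · left; simp [beq_eq_false_iff_ne, Ne.symm h]
      · by_cases h : c = 'y'
        · right; subst h
          simp only [beq_eq_false_iff_ne, ne_eq]
          intro hh
          exact hyl ⟨rfl, by simpa using hh⟩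
        · left; simp [beq_eq_false_iff_ne, Ne.symm h]
    have hc3 : PySem.Chars.endswith (c :: rest).reverse ['i', 'n', 'g'] = false := by
      rw [pvEnd3]
      by_cases h : c = 'g'
      · subst h
        simp only [Bool.and_eq_false_iff, beq_eq_false_iff_ne, ne_eq]
        by_cases h2 : rest.head? = some 'n'
        · right
          intro hh
          exact hgni ⟨rfl, h2, by simpa using hh⟩
        · left; right; simpa using h2
      · simp [beq_eq_false_iff_ne, Ne.symm h]
    rw [dif_neg (by simp only [hc1, Bool.false_eq_true, not_false_eq_true]), dif_neg (by simp only [hc2, Bool.false_eq_true, not_false_eq_true]), dif_neg (by simp only [hc3, Bool.false_eq_true, not_false_eq_true]),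
      pvStripRev, if_neg hsel, if_neg hde, if_neg hyl, if_neg hgni]

-- ===== VERDICT (by name: the statement is the Claim_ definition above) =====
theorem manipulate_spec : Claim_equal_manipulate := by
  intro t _
  unfold Spec_manipulate manipulate manipulate_alt
  rw [pvStopCharsEq]
  show String.ofList (pvLoopA ((pvStop.map (fun c => String.ofList [c])).foldl
      (fun s c => PySem.Str.replace s c "") t).toList) = _
  rw [pvFoldlReplaceFilter]
  rw [show (t.toList.reverse.filter (fun c => !(pvStop.contains c)))
        = (t.toList.filter (fun c => !(pvStop.contains c))).reverse by
      rw [List.filter_reverse]]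
  rw [← pvLoopEqStrip]
  simp
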